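-- pv_equiv track=rewrite | github.com/leo-bro/TIL | python/programmers/lv-zero/string-gathering.py | solution
-- ===== SOURCE A (Python) =====
-- def solution(strArr):
--     strl = []
--     count = {}
--     for s in strArr:
--         strl.append(len(s))
--     for value in strl:
--         try:
--             count[value] += 1
--         except:
--             count[value] = 1
--     answer = max(count)
--     return answer
-- ===== SOURCE B (Python) =====
-- def solution(strArr):
--     return sorted(map(len, strArr))[-1]
-- ===== Notes on version B (the rewrite author's own statement) =====
-- stated objective: alternative
-- what changed: A builds a lengths list, then a frequency dictionary, and takes the max of the dict keys; B sorts the lengths and returns the last element of the sorted list (sort-then-pick instead of histogram-then-max).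
import Mathlib
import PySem

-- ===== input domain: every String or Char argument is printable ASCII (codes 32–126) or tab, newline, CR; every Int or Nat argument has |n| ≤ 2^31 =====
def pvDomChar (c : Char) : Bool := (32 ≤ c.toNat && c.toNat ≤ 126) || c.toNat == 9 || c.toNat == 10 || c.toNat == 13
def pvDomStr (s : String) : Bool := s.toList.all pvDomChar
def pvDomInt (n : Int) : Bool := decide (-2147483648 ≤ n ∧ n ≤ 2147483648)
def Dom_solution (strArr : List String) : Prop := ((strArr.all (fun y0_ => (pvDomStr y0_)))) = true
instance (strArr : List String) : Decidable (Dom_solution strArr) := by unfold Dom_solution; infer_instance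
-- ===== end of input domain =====

-- B sorts the lengths and returns the last element instead of A's lengths-list + frequency-dictionary + max over keys (alternative; return value only).
-- ===== PORT A =====
def solution (strArr : List String) : Int :=
  let strl := strArr.foldl (fun acc s => acc ++ [PySem.Str.len s]) []
  let count := strl.foldl
    (fun d v => if d.contains v then d.insert v (d.getD v 0 + 1) else d.insert v 1)
    (PySem.Dict.empty : PySem.Dict Int Int)
  (PySem.List.max? count.keys (fun x => x)).getD 0

-- ===== PORT B =====
def solution_alt (strArr : List String) : Int :=
  (PySem.List.pyGet? (PySem.List.sorted (strArr.map PySem.Str.len) (fun x => x) false) (-1)).getD 0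

-- ===== PRECONDITION & SPEC =====
-- A raises ValueError (max of an empty dict) on the empty list; B's sorted([])[-1] raises IndexError there.
def Pre_solution (strArr : List String) : Prop := strArr ≠ []
instance (strArr : List String) : Decidable (Pre_solution strArr) := by unfold Pre_solution; infer_instance
def pvWitness_solution : List String := (["ab", "c"])
def Spec_solution (strArr : List String) (out : Int) : Prop := out = solution_alt strArr
instance (strArr : List String) (out : Int) : Decidable (Spec_solution strArr out) := by unfold Spec_solution; infer_instance

-- ===== CLAIM =====
def Claim_equal_solution : Prop := ∀ (strArr : List String), Dom_solution strArr → Pre_solution strArr → Spec_solution strArr (solution strArr)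

-- ===== LEMMAS AND PROOFS =====
theorem foldl_append_map {α β : Type} (f : α → β) (xs : List α) (acc : List β) :
    xs.foldl (fun acc s => acc ++ [f s]) acc = acc ++ xs.map f := by
  induction xs generalizing acc with
  | nil => simp
  | cons h t ih => simp [List.foldl, ih]

theorem step_eq (d : PySem.Dict Int Int) (v : Int) :
    (if d.contains v then d.insert v (d.getD v 0 + 1) else d.insert v 1)
      = d.insert v (if d.contains v then d.getD v 0 + 1 else 1) := by
  split <;> rfl

theorem keys_count (l : List Int) :
    (l.foldl
      (fun d v => if d.contains v then d.insert v (d.getD v 0 + 1) else d.insert v 1)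
      (PySem.Dict.empty : PySem.Dict Int Int)).keys = PySem.Set.ofList l := by
  have h : (l.foldl
      (fun d v => if d.contains v then d.insert v (d.getD v 0 + 1) else d.insert v 1)
      (PySem.Dict.empty : PySem.Dict Int Int))
    = l.foldl
      (fun d v => d.insert v (if d.contains v then d.getD v 0 + 1 else 1))
      (PySem.Dict.empty : PySem.Dict Int Int) := by
    congr 1
    funext d v
    exact step_eq d v
  rw [h, PySem.Dict.keys_foldl_insert]
  simp [PySem.Set.update, PySem.Set.ofList_eq_foldl, PySem.Dict.empty, PySem.Dict.keys]

theorem max?_ofList (l : List Int) :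
    PySem.List.max? (PySem.Set.ofList l) (fun x => x) = PySem.List.max? l (fun x => x) := by
  cases l with
  | nil => rfl
  | cons h t =>
    have hne : PySem.Set.ofList (h :: t) ≠ [] := by
      intro he
      have : h ∈ PySem.Set.ofList (h :: t) := by
        exact (PySem.Set.mem_ofList _ _).mpr List.mem_cons_self
      simp [he] at this
    obtain ⟨m1, hm1⟩ : ∃ m, PySem.List.max? (PySem.Set.ofList (h :: t)) (fun x => x) = some m := by
      cases hx : PySem.List.max? (PySem.Set.ofList (h :: t)) (fun x => x) with
      | none => exact absurd ((PySem.List.max?_eq_none_iff _ _).mp hx) hne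
      | some m => exact ⟨m, rfl⟩
    obtain ⟨m2, hm2⟩ : ∃ m, PySem.List.max? (h :: t) (fun x => x) = some m := by
      cases hx : PySem.List.max? (h :: t) (fun x => x) with
      | none => exact absurd ((PySem.List.max?_eq_none_iff _ _).mp hx) (List.cons_ne_nil h t)
      | some m => exact ⟨m, rfl⟩
    rw [hm1, hm2]
    have h1m : m1 ∈ PySem.Set.ofList (h :: t) := PySem.List.max?_mem hm1
    have h2m : m2 ∈ (h :: t) := PySem.List.max?_mem hm2
    have le1 : m1 ≤ m2 := PySem.List.max?_isMax hm2 m1 ((PySem.Set.mem_ofList _ _).mp h1m)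
    have le2 : m2 ≤ m1 := PySem.List.max?_isMax hm1 m2 ((PySem.Set.mem_ofList _ _).mpr h2m)
    exact congrArg some (le_antisymm le1 le2)

-- Last element of the sorted list is the maximum.
theorem getLast?_sorted_eq_max? (l : List Int) (hne : l ≠ []) :
    (PySem.List.sorted l (fun x => x) false).getLast? = PySem.List.max? l (fun x => x) := by
  set s := PySem.List.sorted l (fun x => x) false with hs
  have hsne : s ≠ [] := by
    intro he
    exact hne ((PySem.List.sorted_eq_nil_iff _ _ _).mp he)
  obtain ⟨m, hm⟩ : ∃ m, PySem.List.max? l (fun x => x) = some m := by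
    cases hx : PySem.List.max? l (fun x => x) with
    | none => exact absurd ((PySem.List.max?_eq_none_iff _ _).mp hx) hne
    | some m => exact ⟨m, rfl⟩
  rw [hm]
  have hlen : 0 < s.length := List.length_pos_iff.mpr hsne
  have hlast : s.getLast? = some s[s.length - 1] := by
    rw [List.getLast?_eq_getElem?, List.getElem?_eq_getElem (by omega)]
  rw [hlast]
  congr 1
  have hperm : s.Perm l := PySem.List.sorted_perm l (fun x => x) false
  -- the last element is in l, hence ≤ m
  have hmem : s[s.length - 1] ∈ l := hperm.mem_iff.mp (List.getElem_mem _)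
  have hle1 : s[s.length - 1] ≤ m := PySem.List.max?_isMax hm _ hmem
  -- m is in s, hence ≤ last by sortedness
  have hmems : m ∈ s := hperm.mem_iff.mpr (PySem.List.max?_mem hm)
  obtain ⟨p, hp, hpe⟩ := List.getElem_of_mem hmems
  have hle2 : m ≤ s[s.length - 1] := by
    rw [← hpe]
    have hp' : p ≤ s.length - 1 := by omega
    have hq' : s.length - 1 < (PySem.List.sorted l (fun x => x) false).length := by
      rw [← hs]; omega
    simpa only [← hs] using PySem.List.sorted_id_getElem_mono l hp' hq'
  exact le_antisymm hle1 hle2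

-- ===== VERDICT =====
theorem solution_spec : Claim_equal_solution := by
  intro strArr _ hpre
  unfold Spec_solution solution solution_alt
  have hne : strArr.map PySem.Str.len ≠ [] := by
    simpa using hpre
  simp only [foldl_append_map, List.nil_append, keys_count, max?_ofList,
    PySem.List.pyGet?_neg_one, getLast?_sorted_eq_max? _ hne]
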